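-- pv_equiv track=rewrite | github.com/JudeBetow/analyze_replicates | pp-frameplot.py | lifetimes_from_frame_list
-- ===== SOURCE A (Python) =====
-- def lifetimes_from_frame_list(frames_list):
--     """Return list of contiguous-run lengths (counts of consecutive frames)."""
--     if not frames_list:
--         return []
--     frames = sorted(frames_list)
--     lengths = []
--     cur = frames[0]
--     length = 1
--     for a, b in zip(frames, frames[1:]):
--         if b == a + 1:
--             length += 1
--         else:
--             lengths.append(length)
--             length = 1
--     lengths.append(length)
--     return lengths
-- ===== SOURCE B (Python) =====
-- def lifetimes_from_frame_list(frames_list):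
--     """Return list of contiguous-run lengths (counts of consecutive frames)."""
--     if not frames_list:
--         return []
--     frames = sorted(frames_list)
--     n = len(frames)
--     cuts = [i for i, (a, b) in enumerate(zip(frames, frames[1:]), 1) if b != a + 1]
--     bounds = [0] + cuts + [n]
--     return [q - p for p, q in zip(bounds, bounds[1:])]
-- ===== Notes on version B (the rewrite author's own statement) =====
-- stated objective: alternative
-- what changed: Instead of A's fold carrying a running counter and appending on each break, B records the cut positions (indices where the sorted list breaks contiguity) into a boundary list seeded with 0 and closed with the length, then returns consecutive differences of the boundaries; run lengths arise by subtraction, not by counting.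
import Mathlib
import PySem

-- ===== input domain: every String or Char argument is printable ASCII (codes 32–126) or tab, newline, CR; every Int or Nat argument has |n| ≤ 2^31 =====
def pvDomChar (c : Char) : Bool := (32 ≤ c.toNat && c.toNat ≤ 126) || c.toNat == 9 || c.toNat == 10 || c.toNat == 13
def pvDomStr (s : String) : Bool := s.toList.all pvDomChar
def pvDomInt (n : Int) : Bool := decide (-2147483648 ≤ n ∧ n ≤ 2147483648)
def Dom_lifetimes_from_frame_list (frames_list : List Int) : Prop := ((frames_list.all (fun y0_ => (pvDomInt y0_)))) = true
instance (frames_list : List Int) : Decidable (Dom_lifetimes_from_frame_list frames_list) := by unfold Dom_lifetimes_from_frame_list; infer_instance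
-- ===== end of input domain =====

-- B (alternative decomposition): instead of A's running-counter fold, B collects the cut
-- positions where a run breaks and returns consecutive differences of the boundary list.

-- ===== PORT A =====
-- loop body of A's for-loop: state = (lengths, length)
def pvStepA (st : List Int × Int) (p : Int × Int) : List Int × Int :=
  if p.2 = p.1 + 1 then (st.1, st.2 + 1) else (st.1 ++ [st.2], 1)

def lifetimes_from_frame_list (frames_list : List Int) : List Int :=
  match frames_list with
  | [] => []
  | _ :: _ =>
    let frames := PySem.List.sorted frames_list (fun x => x) false
    let _cur := PySem.List.pyGet? frames 0   -- A's unused 'cur = frames[0]'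
    let st := (frames.zip frames.tail).foldl pvStepA ([], 1)
    st.1 ++ [st.2]

-- ===== PORT B =====
-- the comprehension filter of B: keep index i when b != a + 1
def pvCutB (p : Int × (Int × Int)) : Option Int :=
  if p.2.2 ≠ p.2.1 + 1 then some p.1 else none

-- consecutive differences: [q - p for p, q in zip(xs, xs[1:])]
def pvDiffsB (xs : List Int) : List Int := (xs.zip xs.tail).map (fun p => p.2 - p.1)

def lifetimes_from_frame_list_alt (frames_list : List Int) : List Int :=
  match frames_list with
  | [] => []
  | _ :: _ =>
    let frames := PySem.List.sorted frames_list (fun x => x) false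
    let n : Int := frames.length
    let cuts := (PySem.List.enumerate (frames.zip frames.tail) 1).filterMap pvCutB
    let bounds : List Int := 0 :: cuts ++ [n]
    pvDiffsB bounds

-- ===== PRECONDITION & SPEC =====
def Spec_lifetimes_from_frame_list (frames_list : List Int) (out : List Int) : Prop := out = lifetimes_from_frame_list_alt frames_list
instance (frames_list : List Int) (out : List Int) : Decidable (Spec_lifetimes_from_frame_list frames_list out) := by unfold Spec_lifetimes_from_frame_list; infer_instance

-- ===== CLAIM (what is proved, stated in full; the proofs are below) =====
def Claim_equal_lifetimes_from_frame_list : Prop := ∀ (frames_list : List Int), Dom_lifetimes_from_frame_list frames_list → Spec_lifetimes_from_frame_list frames_list (lifetimes_from_frame_list frames_list)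

-- ===== LEMMAS AND PROOFS =====

-- pvDiffsB on a list with at least two elements peels the first difference
theorem pvDiffsB_cons_cons (x y : Int) (t : List Int) :
    pvDiffsB (x :: y :: t) = (y - x) :: pvDiffsB (y :: t) := rfl

-- Invariant of A's fold vs. B's cut positions: folding over the pair list ps, whose first
-- pair sits at index k and whose current run started l positions before k, finishes
-- exactly with the consecutive differences of the boundary list.
-- reductions of A's step and B's filter on the two branch outcomes
theorem pvStepA_pos (L : List Int) (l a : Int) : pvStepA (L, l) (a, a + 1) = (L, l + 1) := by
  simp [pvStepA]

theorem pvStepA_neg {a b : Int} (h : b ≠ a + 1) (L : List Int) (l : Int) :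
    pvStepA (L, l) (a, b) = (L ++ [l], 1) := by
  simp [pvStepA, h]

theorem pvCutB_pos {k a : Int} : pvCutB (k, (a, a + 1)) = none := by
  simp [pvCutB]

theorem pvCutB_neg {k a b : Int} (h : b ≠ a + 1) : pvCutB (k, (a, b)) = some k := by
  simp [pvCutB, h]

theorem pvKey (ps : List (Int × Int)) (k : Int) (L : List Int) (l : Int) :
    (let st := ps.foldl pvStepA (L, l); st.1 ++ [st.2])
      = L ++ pvDiffsB ((k - l) :: ((PySem.List.enumerate ps k).filterMap pvCutB ++ [k + (ps.length : Int)])) := by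
  induction ps generalizing k L l with
  | nil =>
    simp [pvDiffsB]
  | cons p rest ih =>
    obtain ⟨a, b⟩ := p
    rw [List.foldl_cons, PySem.List.enumerate_cons, List.length_cons]
    by_cases hb : b = a + 1
    · subst hb
      rw [pvStepA_pos, List.filterMap_cons_none pvCutB_pos,
        show k + ((rest.length + 1 : Nat) : Int) = (k + 1) + (rest.length : Int) by push_cast; ring]
      have H := ih (k + 1) L (l + 1)
      rw [show (k + 1) - (l + 1) = k - l by ring] at H
      exact H
    · rw [pvStepA_neg hb, List.filterMap_cons_some (pvCutB_neg hb)]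
      rw [List.cons_append, pvDiffsB_cons_cons, show k - (k - l) = l by ring]
      have H := ih (k + 1) (L ++ [l]) 1
      rw [show (k + 1) - (1 : Int) = k by ring,
        show (k + 1) + ((rest.length : Nat) : Int) = k + ((rest.length + 1 : Nat) : Int) by push_cast; ring] at H
      rw [H, List.append_assoc, List.singleton_append]

-- ===== VERDICT (by name: the statement is the Claim_ definition above) =====
theorem lifetimes_from_frame_list_spec : Claim_equal_lifetimes_from_frame_list := by
  intro fl _
  unfold Spec_lifetimes_from_frame_list lifetimes_from_frame_list lifetimes_from_frame_list_alt
  match fl with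
  | [] => rfl
  | x :: xs =>
    simp only
    set frames := PySem.List.sorted (x :: xs) (fun x => x) false with hf
    clear_value frames
    have hne : frames ≠ [] := by
      rw [hf]; simp [PySem.List.sorted_eq_nil_iff]
    obtain ⟨f0, ft, hcons⟩ := List.exists_cons_of_ne_nil hne
    have := pvKey (frames.zip frames.tail) 1 [] 1
    simp only [List.nil_append] at this
    have hL : 1 ≤ frames.length := by rw [hcons]; simp
    have hz : (frames.zip frames.tail).length = frames.length - 1 := by rw [hcons]; simp
    rw [this, hz, show (1:Int) - 1 = 0 from by norm_num,
      show 1 + ((frames.length - 1 : Nat) : Int) = (frames.length : Int) from by omega,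
      List.cons_append]
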